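-- pv_equiv track=rewrite | github.com/DongliangSong/AAISPT | Data_enhance/Event_identify/Double_check.py | _find_consecutive_nans
-- ===== SOURCE A (Python) =====
-- def _find_consecutive_nans(mask):
--     """
--     Find regions of consecutive nan values
--
--     Args:
--         mask: Boolean mask array
--
--     Returns:
--         List of regions, each element is (start, end)
--     """
--     regions = []
--     start = None
--
--     for i in range(len(mask)):
--         if mask[i] and start is None:
--             start = i
--         elif not mask[i] and start is not None:
--             regions.append((start, i - 1))
--             start = None
--
--     if start is not None:
--         regions.append((start, len(mask) - 1))
--
--     return regions
-- ===== SOURCE B (Python) =====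
-- from itertools import groupby
--
-- def _find_consecutive_nans(mask):
--     regions = []
--     idx = 0
--     for key, grp in groupby(mask):
--         n = sum(1 for _ in grp)
--         if key:
--             regions.append((idx, idx + n - 1))
--         idx += n
--     return regions
-- ===== Notes on version B (the rewrite author's own statement) =====
-- stated objective: idiomatic
-- what changed: Replaces the element-by-element scan with a start sentinel by itertools.groupby over the mask: each consecutive run becomes one group, a truthy group maps directly to an inclusive (idx, idx+n-1) pair, and a running index advances by the group length.
import Mathlib
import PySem

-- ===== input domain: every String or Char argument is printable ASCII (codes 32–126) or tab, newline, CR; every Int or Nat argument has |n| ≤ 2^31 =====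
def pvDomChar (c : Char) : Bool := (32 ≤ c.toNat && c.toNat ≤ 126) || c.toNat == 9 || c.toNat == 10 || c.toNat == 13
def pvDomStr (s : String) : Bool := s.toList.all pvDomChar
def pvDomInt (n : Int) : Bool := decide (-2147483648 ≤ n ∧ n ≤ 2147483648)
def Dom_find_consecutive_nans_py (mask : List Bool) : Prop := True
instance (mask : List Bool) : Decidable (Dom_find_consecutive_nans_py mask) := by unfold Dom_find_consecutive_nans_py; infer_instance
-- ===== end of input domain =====

-- B finds the same runs via grouping consecutive equal elements (itertools.groupby) instead of A's start-sentinel scan; idiomatic, same cost.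

-- ===== PORT A =====
-- A's loop 'for i in range(len(mask))' reads mask[i] strictly in order, so the port
-- recurses structurally over the remaining list while carrying the index i and the
-- same state (regions, start); the [] case is the code after the loop.
def findA : List Bool → Int → Option Int → List (Int × Int) → List (Int × Int)
  | [], i, start, regions =>
      match start with
      | some s => regions ++ [(s, i - 1)]   -- len(mask) - 1 = i - 1 here
      | none => regions
  | b :: t, i, start, regions =>
      if b && start.isNone then
        findA t (i + 1) (some i) regions
      else if !b && start.isSome then
        findA t (i + 1) none (regions ++ [(start.getD 0, i - 1)])
      else
        findA t (i + 1) start regions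

def find_consecutive_nans_py (mask : List Bool) : List (Int × Int) :=
  findA mask 0 none []

-- ===== PORT B =====
-- groupby: each step peels one maximal run of elements equal to the head.
def findB : List Bool → Int → List (Int × Int)
  | [], _ => []
  | b :: t, idx =>
      let grp := t.takeWhile (· == b)
      let n : Int := 1 + grp.length
      let rest := t.drop grp.length
      if b then (idx, idx + n - 1) :: findB rest (idx + n)
      else findB rest (idx + n)
termination_by t _ => t.length
decreasing_by
  all_goals (have := (t.takeWhile_sublist (· == b)).length_le;
             simp only [List.length_drop, List.length_cons]; omega)

def find_consecutive_nans_py_alt (mask : List Bool) : List (Int × Int) :=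
  findB mask 0

-- ===== PRECONDITION & SPEC =====
def Spec_find_consecutive_nans_py (mask : List Bool) (out : List (Int × Int)) : Prop := out = find_consecutive_nans_py_alt mask
instance (mask : List Bool) (out : List (Int × Int)) : Decidable (Spec_find_consecutive_nans_py mask out) := by unfold Spec_find_consecutive_nans_py; infer_instance

-- ===== CLAIM (what is proved, stated in full; the proofs are below) =====
def Claim_equal_find_consecutive_nans_py : Prop := ∀ (mask : List Bool), Dom_find_consecutive_nans_py mask → Spec_find_consecutive_nans_py mask (find_consecutive_nans_py mask)

-- ===== LEMMAS AND PROOFS =====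

-- length of the leading run of `true`s
def cntT (t : List Bool) : Int := ((t.takeWhile (· == true)).length : Int)

-- B skips a leading false element, advancing the index by one.
lemma findB_false_cons (t : List Bool) (i : Int) :
    findB (false :: t) i = findB t (i + 1) := by
  cases t with
  | nil => simp [findB]
  | cons b u =>
    cases b with
    | false =>
      simp only [findB, List.takeWhile]
      norm_num
      ring_nf
    | true =>
      simp [findB]

-- joint invariant: A with no open run produces B's output; A with an open run
-- started at s closes it after the leading true-run of the remainder.
lemma findA_invariant (t : List Bool) :
    (∀ i regions, findA t i none regions = regions ++ findB t i) ∧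
    (∀ i s regions, findA t i (some s) regions =
      regions ++ (s, i + cntT t - 1) :: findB (t.drop (t.takeWhile (· == true)).length) (i + cntT t)) := by
  induction t with
  | nil =>
    refine ⟨?_, ?_⟩ <;> intro i
    · intro regions; simp [findA, findB]
    · intro s regions; simp [findA, findB, cntT]
  | cons b t ih =>
    cases b with
    | false =>
      constructor
      · intro i regions
        simp only [findA, Bool.false_and, Option.isNone_none, Bool.not_false,
          Option.isSome_none, Bool.and_false]
        norm_num
        rw [ih.1, findB_false_cons]
      · intro i s regions
        simp only [findA]
        norm_num
        rw [ih.1, findB_false_cons]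
        simp [cntT, List.takeWhile]
    | true =>
      constructor
      · intro i regions
        simp only [findA]
        norm_num
        rw [ih.2]
        simp only [findB]
        norm_num [cntT]
        constructor
        · ring
        · ring_nf
      · intro i s regions
        simp only [findA]
        norm_num
        rw [ih.2]
        simp [cntT, List.takeWhile]
        constructor
        · ring
        · ring_nf

-- ===== VERDICT (by name: the statement is the Claim_ definition above) =====
theorem find_consecutive_nans_py_spec : Claim_equal_find_consecutive_nans_py := by
  intro mask _
  unfold Spec_find_consecutive_nans_py find_consecutive_nans_py find_consecutive_nans_py_alt
  simpa using (findA_invariant mask).1 0 []
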